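-- pv_equiv track=rewrite | github.com/nbrg-ppcu/prokbert | src/prokbert/traininghelper_utils.py | guess_initial_batch_size_komondor_prokbert
-- ===== SOURCE A (Python) =====
-- def guess_initial_batch_size_komondor_prokbert(basemodel, actL):
--     standard_params = {
--         256: {'batch_size': 256, 'gradient_accumulation_steps': 1},
--         512: {'batch_size': 128, 'gradient_accumulation_steps': 1},
--         1024: {'batch_size': 32, 'gradient_accumulation_steps': 2},
--     }
--
--     long_params = {
--         256: {'batch_size': 384, 'gradient_accumulation_steps': 1},
--         512: {'batch_size': 256, 'gradient_accumulation_steps': 1},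
--         1024: {'batch_size': 128, 'gradient_accumulation_steps': 1},
--         1536: {'batch_size': 64, 'gradient_accumulation_steps': 2},
--     }
--
--     standard_params = {
--         256: {'batch_size': 512, 'gradient_accumulation_steps': 1},
--         512: {'batch_size': 196, 'gradient_accumulation_steps': 1},
--         1022: {'batch_size': 64, 'gradient_accumulation_steps': 2},
--     }
--
--     long_params = {
--         256: {'batch_size': 512, 'gradient_accumulation_steps': 1},
--         512: {'batch_size': 384, 'gradient_accumulation_steps': 1},
--         1022: {'batch_size': 160, 'gradient_accumulation_steps': 1},
--         1536: {'batch_size': 32, 'gradient_accumulation_steps': 2},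
--     }
--
--     # Use long_params if model is a long variant, otherwise use standard_params
--     if 'prokbert-mini-long' in basemodel:
--         param_mapping = long_params
--     else:
--         param_mapping = standard_params
--
--     # Ensure actL 1536 only for long model variants
--     if actL == 1536 and 'prokbert-mini-long' not in basemodel:
--         raise ValueError("Segment length 1536 is only valid for prokbert-mini-long.")
--
--     # Sorted thresholds for parameter selection
--     keys = sorted(param_mapping.keys())
--
--     # Select the largest threshold that does not exceed actL
--     if actL <= keys[0]:
--         chosen_key = keys[0]
--     else:
--         chosen_key = None
--         for k in keys:
--             if k <= actL:
--                 chosen_key = k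
--             else:
--                 break
--
--     if chosen_key is None:
--         raise ValueError(f"Invalid segment length {actL} for the model {basemodel}.")
--
--     batch_size = param_mapping[chosen_key]['batch_size']
--     gradient_accumulation_steps = param_mapping[chosen_key]['gradient_accumulation_steps']
--     return chosen_key, batch_size, gradient_accumulation_steps
-- ===== SOURCE B (Python) =====
-- import bisect
--
-- # flat (threshold, batch_size, grad_accum_steps) tables; only the live (second) dicts of A matter
-- _STANDARD = [(256, 512, 1), (512, 196, 1), (1022, 64, 2)]
-- _LONG = [(256, 512, 1), (512, 384, 1), (1022, 160, 1), (1536, 32, 2)]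
--
-- def guess_initial_batch_size_komondor_prokbert(basemodel, actL):
--     is_long = 'prokbert-mini-long' in basemodel
--     if actL == 1536 and not is_long:
--         raise ValueError("Segment length 1536 is only valid for prokbert-mini-long.")
--     table = _LONG if is_long else _STANDARD
--     keys = [k for k, _, _ in table]
--     i = max(bisect.bisect_right(keys, actL) - 1, 0)
--     return table[i]
-- ===== Notes on version B (the rewrite author's own statement) =====
-- stated objective: idiomatic
-- what changed: Drops the dead first pair of dicts and the nested per-key dicts for a flat sorted (threshold, batch_size, grad_accum) table, and replaces the linear accumulate-and-break scan plus the separate keys[0] clamp with a single clamped bisect_right lookup.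
import Mathlib
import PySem

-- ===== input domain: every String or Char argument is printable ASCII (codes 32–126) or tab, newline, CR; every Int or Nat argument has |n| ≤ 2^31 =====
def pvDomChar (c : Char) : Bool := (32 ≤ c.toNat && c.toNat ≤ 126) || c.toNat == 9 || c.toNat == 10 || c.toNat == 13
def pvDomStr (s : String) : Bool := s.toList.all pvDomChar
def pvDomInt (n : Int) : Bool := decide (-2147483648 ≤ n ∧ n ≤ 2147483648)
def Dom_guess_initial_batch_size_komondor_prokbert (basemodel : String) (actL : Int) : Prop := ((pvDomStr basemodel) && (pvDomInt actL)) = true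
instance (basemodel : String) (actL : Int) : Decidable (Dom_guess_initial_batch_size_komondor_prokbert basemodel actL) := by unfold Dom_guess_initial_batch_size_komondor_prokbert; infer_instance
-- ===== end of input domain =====

-- B replaces A's dead dict pair, nested dicts and linear accumulate-and-break scan by one clamped bisect_right over a flat sorted table; return-value equivalence on Pre_ (A raises only at actL = 1536 for non-long models, excluded).

-- ===== PORT A =====
-- helper for A's 'for k in keys: if k <= actL: chosen_key = k else: break'
def pvChooseLoop (keys : List Int) (actL : Int) (acc : Option Int) : Option Int :=
  match keys with
  | [] => acc
  | k :: rest => if k ≤ actL then pvChooseLoop rest actL (some k) else acc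

def guess_initial_batch_size_komondor_prokbert (basemodel : String) (actL : Int) : Int × Int × Int :=
  -- first two dict assignments are dead (immediately overwritten); the live ones:
  let standard_params : PySem.Dict Int (PySem.Dict String Int) :=
    (((PySem.Dict.empty).insert 256 (((PySem.Dict.empty).insert "batch_size" 512).insert "gradient_accumulation_steps" 1)).insert
      512 (((PySem.Dict.empty).insert "batch_size" 196).insert "gradient_accumulation_steps" 1)).insert
      1022 (((PySem.Dict.empty).insert "batch_size" 64).insert "gradient_accumulation_steps" 2)
  let long_params : PySem.Dict Int (PySem.Dict String Int) :=
    ((((PySem.Dict.empty).insert 256 (((PySem.Dict.empty).insert "batch_size" 512).insert "gradient_accumulation_steps" 1)).insert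
      512 (((PySem.Dict.empty).insert "batch_size" 384).insert "gradient_accumulation_steps" 1)).insert
      1022 (((PySem.Dict.empty).insert "batch_size" 160).insert "gradient_accumulation_steps" 1)).insert
      1536 (((PySem.Dict.empty).insert "batch_size" 32).insert "gradient_accumulation_steps" 2)
  let param_mapping := if PySem.Str.isIn "prokbert-mini-long" basemodel then long_params else standard_params
  -- the 'actL == 1536 and not long' raise is excluded by Pre_
  let keys := PySem.List.sorted (PySem.Dict.keys param_mapping) (fun k => k)
  let chosen_key : Option Int :=
    match PySem.List.pyGet? keys 0 with
    | none => none            -- unreachable: keys is nonempty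
    | some k0 => if actL ≤ k0 then some k0 else pvChooseLoop keys actL none
  match chosen_key with
  | none => (0, 0, 0)         -- Python would raise; unreachable since keys[0] ≤ actL in the scan branch
  | some ck =>
    match PySem.Dict.get? param_mapping ck with
    | none => (0, 0, 0)       -- unreachable: ck ∈ keys
    | some inner =>
      (ck, PySem.Dict.getD inner "batch_size" 0, PySem.Dict.getD inner "gradient_accumulation_steps" 0)

-- ===== PORT B =====
def pvStandardTable : List (Int × Int × Int) := [(256, 512, 1), (512, 196, 1), (1022, 64, 2)]
def pvLongTable : List (Int × Int × Int) := [(256, 512, 1), (512, 384, 1), (1022, 160, 1), (1536, 32, 2)]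

def guess_initial_batch_size_komondor_prokbert_alt (basemodel : String) (actL : Int) : Int × Int × Int :=
  let isLong := PySem.Str.isIn "prokbert-mini-long" basemodel
  -- the 'actL == 1536 and not is_long' raise is excluded by Pre_
  let table := if isLong then pvLongTable else pvStandardTable
  let keys := table.map (fun t => t.1)
  let i : Int := max ((PySem.List.bisectRight keys actL : Int) - 1) 0
  PySem.List.pyGetD table i (0, 0, 0)   -- in-range: 0 ≤ i < table.length

-- ===== PRECONDITION & SPEC =====
-- Pre_ excludes exactly the inputs where Python A raises ValueError: actL = 1536 with a non-long model.
def Pre_guess_initial_batch_size_komondor_prokbert (basemodel : String) (actL : Int) : Prop :=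
  ¬ (actL = 1536 ∧ PySem.Str.isIn "prokbert-mini-long" basemodel = false)
instance (basemodel : String) (actL : Int) : Decidable (Pre_guess_initial_batch_size_komondor_prokbert basemodel actL) := by unfold Pre_guess_initial_batch_size_komondor_prokbert; infer_instance
def pvWitness_guess_initial_batch_size_komondor_prokbert : String × Int := ("prokbert-mini", 512)

def Spec_guess_initial_batch_size_komondor_prokbert (basemodel : String) (actL : Int) (out : Int × Int × Int) : Prop := out = guess_initial_batch_size_komondor_prokbert_alt basemodel actL
instance (basemodel : String) (actL : Int) (out : Int × Int × Int) : Decidable (Spec_guess_initial_batch_size_komondor_prokbert basemodel actL out) := by unfold Spec_guess_initial_batch_size_komondor_prokbert; infer_instance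

-- ===== CLAIM (what is proved, stated in full; the proofs are below) =====
def Claim_equal_guess_initial_batch_size_komondor_prokbert : Prop := ∀ (basemodel : String) (actL : Int), Dom_guess_initial_batch_size_komondor_prokbert basemodel actL → Pre_guess_initial_batch_size_komondor_prokbert basemodel actL → Spec_guess_initial_batch_size_komondor_prokbert basemodel actL (guess_initial_batch_size_komondor_prokbert basemodel actL)

-- ===== LEMMAS AND PROOFS =====
-- ===== VERDICT (by name: the statement is the Claim_ definition above) =====
set_option maxHeartbeats 2000000 in
theorem guess_initial_batch_size_komondor_prokbert_spec : Claim_equal_guess_initial_batch_size_komondor_prokbert := by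
  intro basemodel actL _ hpre
  unfold Spec_guess_initial_batch_size_komondor_prokbert
  unfold guess_initial_batch_size_komondor_prokbert guess_initial_batch_size_komondor_prokbert_alt
  cases h : PySem.Str.isIn "prokbert-mini-long" basemodel with
  | true =>
    by_cases h1 : actL ≤ 256 <;> by_cases h2 : actL < 512 <;> by_cases h3 : actL < 1022 <;>
      by_cases h4 : actL < 1536 <;>
      simp_all [pvChooseLoop, pvStandardTable, pvLongTable, PySem.List.bisectRight,
        PySem.List.bisectRightLoop, PySem.List.sorted, PySem.List.insertBy, PySem.Dict.keys,
        PySem.Dict.insert, PySem.Dict.empty, PySem.Dict.get?, PySem.Dict.getD,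
        PySem.List.pyGet?, PySem.List.pyGetD, PySem.List.pyIdx?, not_lt, not_le,
        le_of_lt] <;> by_cases h0 : actL < 256 <;> split_ifs <;> first | rfl | omega
  | false =>
    by_cases h1 : actL ≤ 256 <;> by_cases h2 : actL < 512 <;> by_cases h3 : actL < 1022 <;>
      simp_all [pvChooseLoop, pvStandardTable, pvLongTable, PySem.List.bisectRight,
        PySem.List.bisectRightLoop, PySem.List.sorted, PySem.List.insertBy, PySem.Dict.keys,
        PySem.Dict.insert, PySem.Dict.empty, PySem.Dict.get?, PySem.Dict.getD,
        PySem.List.pyGet?, PySem.List.pyGetD, PySem.List.pyIdx?, not_lt, not_le,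
        le_of_lt] <;> by_cases h0 : actL < 256 <;> split_ifs <;> first | rfl | omega
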